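-- pv_equiv track=rewrite | github.com/Webring/universal-installer-for-windows | utils/uip/section_parsers/table.py | parse_dict_in_dict_section
-- ===== SOURCE A (Python) =====
-- def parse_dict_in_dict_section(cleared_lines):
--     data = dict()
--     subsection_name = None
--     for line in cleared_lines:
--         if "=" in line:
--             if subsection_name is not None:
--                 key, value = line.split("=", 1)
--                 data[subsection_name][key] = value.strip()
--         else:
--             subsection_name = line.strip()
--             data[subsection_name] = dict()
--
--     return data
-- ===== SOURCE B (Python) =====
-- def parse_dict_in_dict_section(cleared_lines):
--     # phase 1: partition the lines into (header, body-lines) groups;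
--     # '=' lines before any header are dropped
--     groups = []
--     for line in cleared_lines:
--         if "=" in line:
--             if groups:
--                 groups[-1][1].append(line)
--         else:
--             groups.append((line.strip(), []))
--     # phase 2: build each subsection dict; a repeated header's later group overwrites
--     data = {}
--     for name, body in groups:
--         sub = {}
--         for ln in body:
--             key, value = ln.split("=", 1)
--             sub[key] = value.strip()
--         data[name] = sub
--     return data
-- ===== Notes on version B (the rewrite author's own statement) =====
-- stated objective: alternative
-- what changed: Replaces the one-pass interleaved state machine that mutates nested dicts as it scans with a two-phase pipeline: first partition the lines into (header, body-lines) groups, then construct each subsection dict from its group.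
import Mathlib
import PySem

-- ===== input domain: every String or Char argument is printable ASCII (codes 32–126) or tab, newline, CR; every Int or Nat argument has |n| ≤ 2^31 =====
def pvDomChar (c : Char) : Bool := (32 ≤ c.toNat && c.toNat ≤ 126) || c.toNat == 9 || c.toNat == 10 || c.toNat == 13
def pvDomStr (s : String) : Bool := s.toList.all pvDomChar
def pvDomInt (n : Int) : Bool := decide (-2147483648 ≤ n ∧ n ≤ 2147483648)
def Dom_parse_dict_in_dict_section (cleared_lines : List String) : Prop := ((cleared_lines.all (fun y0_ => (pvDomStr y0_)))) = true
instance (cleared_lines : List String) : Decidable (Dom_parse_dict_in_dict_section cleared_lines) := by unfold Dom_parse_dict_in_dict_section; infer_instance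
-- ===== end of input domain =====

-- B re-implements the one-pass state machine as partition-into-groups then build; same values, no speed claim.

-- ===== PORT A =====
-- A's loop body; state = (data : dict of dicts, current subsection name or None);
-- the `| _ => st` split fallback is unreachable (split("=",1) yields exactly 2 pieces when "=" ∈ line)
def pvStepA (st : PySem.Dict String (PySem.Dict String String) × Option String) (line : String) :
    PySem.Dict String (PySem.Dict String String) × Option String :=
  if PySem.Str.isIn "=" line then
    match st.2 with
    | some n =>
      match PySem.Str.splitMax? line "=" 1 with
      | some [key, value] =>
        -- data[subsection_name][key] = value.strip()  (in-place update of the inner dict)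
        (st.1.modify n PySem.Dict.empty (fun sub => sub.insert key (PySem.Str.strip value)), st.2)
      | _ => st
    | none => st
  else
    (st.1.insert (PySem.Str.strip line) PySem.Dict.empty, some (PySem.Str.strip line))

def parse_dict_in_dict_section (cleared_lines : List String) : List (String × List (String × String)) :=
  ((cleared_lines.foldl pvStepA (PySem.Dict.empty, none)).1.items.map (fun p => (p.1, p.2.items)))

-- ===== PORT B =====
-- groups[-1][1].append(line)
def pvPushLast (gs : List (String × List String)) (line : String) : List (String × List String) :=
  match gs with
  | [] => []
  | [g] => [(g.1, g.2 ++ [line])]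
  | g :: rest => g :: pvPushLast rest line

-- phase-1 loop body: open a group on a header line, else append to the last group (if any)
def pvStepB (gs : List (String × List String)) (line : String) : List (String × List String) :=
  if PySem.Str.isIn "=" line then
    if gs.isEmpty then gs else pvPushLast gs line
  else
    gs ++ [(PySem.Str.strip line, [])]

-- the inner loop of phase 2: {key: value.strip() for each body line}
def pvBuildSub (body : List String) : PySem.Dict String String :=
  body.foldl
    (fun sub ln =>
      match PySem.Str.splitMax? ln "=" 1 with
      | some [key, value] => sub.insert key (PySem.Str.strip value)
      | _ => sub)
    PySem.Dict.empty

def parse_dict_in_dict_section_alt (cleared_lines : List String) : List (String × List (String × String)) :=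
  let groups := cleared_lines.foldl pvStepB []
  let data := groups.foldl
    (fun (d : PySem.Dict String (PySem.Dict String String)) p => d.insert p.1 (pvBuildSub p.2))
    PySem.Dict.empty
  data.items.map (fun p => (p.1, p.2.items))

-- ===== PRECONDITION & SPEC =====
def Spec_parse_dict_in_dict_section (cleared_lines : List String) (out : List (String × List (String × String))) : Prop := out = parse_dict_in_dict_section_alt cleared_lines
instance (cleared_lines : List String) (out : List (String × List (String × String))) : Decidable (Spec_parse_dict_in_dict_section cleared_lines out) := by unfold Spec_parse_dict_in_dict_section; infer_instance

-- ===== CLAIM (what is proved, stated in full; the proofs are below) =====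
def Claim_equal_parse_dict_in_dict_section : Prop := ∀ (cleared_lines : List String), Dom_parse_dict_in_dict_section cleared_lines → Spec_parse_dict_in_dict_section cleared_lines (parse_dict_in_dict_section cleared_lines)

-- ===== LEMMAS AND PROOFS =====

-- phase-2 dict built from a group list
def pvDictOf (g : List (String × List String)) : PySem.Dict String (PySem.Dict String String) :=
  g.foldl (fun d p => d.insert p.1 (pvBuildSub p.2)) PySem.Dict.empty

-- current subsection name of A ↔ name of the last group of B
def pvLastName (g : List (String × List String)) : Option String :=
  (g.getLast?).map (·.1)

lemma pvLastName_concat (g : List (String × List String)) (x : String × List String) :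
    pvLastName (g ++ [x]) = some x.1 := by
  simp [pvLastName]

lemma pvDictOf_concat (g : List (String × List String)) (n : String) (xs : List String) :
    pvDictOf (g ++ [(n, xs)]) = (pvDictOf g).insert n (pvBuildSub xs) := by
  simp [pvDictOf, List.foldl_append]

lemma pvBuildSub_concat (body : List String) (ln : String) :
    pvBuildSub (body ++ [ln]) =
      (match PySem.Str.splitMax? ln "=" 1 with
       | some [key, value] => (pvBuildSub body).insert key (PySem.Str.strip value)
       | _ => pvBuildSub body) := by
  simp [pvBuildSub, List.foldl_append]

lemma pvPushLast_concat (g : List (String × List String)) (n : String) (gl : List String) (line : String) :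
    pvPushLast (g ++ [(n, gl)]) line = g ++ [(n, gl ++ [line])] := by
  induction g with
  | nil => simp [pvPushLast]
  | cons a g ih =>
    cases g with
    | nil => simp [pvPushLast]
    | cons b g => simpa [pvPushLast] using ih

lemma pvStep_eq (g : List (String × List String)) (line : String) :
    pvStepA (pvDictOf g, pvLastName g) line = (pvDictOf (pvStepB g line), pvLastName (pvStepB g line)) := by
  unfold pvStepA pvStepB
  by_cases h : PySem.Str.isIn "=" line = true
  · rw [if_pos h, if_pos h]
    rcases List.eq_nil_or_concat g with rfl | ⟨g', x, rfl⟩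
    · simp [pvLastName, pvDictOf]
    · obtain ⟨n, gl⟩ := x
      have hl : pvLastName (g' ++ [(n, gl)]) = some n := pvLastName_concat g' (n, gl)
      have hne : (g' ++ [(n, gl)]).isEmpty = false := by simp
      simp only [List.concat_eq_append]
      rw [hl, hne, pvPushLast_concat]
      dsimp only
      cases hsp : PySem.Str.splitMax? line "=" 1 with
      | none =>
        simp [pvDictOf_concat, pvBuildSub_concat, pvLastName_concat, hsp]
      | some parts =>
        match parts with
        | [] =>
          simp [pvDictOf_concat, pvBuildSub_concat, pvLastName_concat, hsp]
        | [k] =>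
          simp [pvDictOf_concat, pvBuildSub_concat, pvLastName_concat, hsp]
        | [k, v] =>
          simp [pvDictOf_concat, pvBuildSub_concat, pvLastName_concat, hsp,
                PySem.Dict.modify, PySem.Dict.getD_insert_self, PySem.Dict.insert_insert_self]
        | k :: v :: w :: rest =>
          simp [pvDictOf_concat, pvBuildSub_concat, pvLastName_concat, hsp]
  · have h' : PySem.Str.isIn "=" line = false := by simpa using h
    rw [if_neg (by simp only [h', Bool.false_eq_true, not_false_eq_true]),
        if_neg (by simp only [h', Bool.false_eq_true, not_false_eq_true])]
    rw [pvLastName_concat, pvDictOf_concat]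
    rfl

lemma pvMain (ls : List String) : ∀ (g : List (String × List String)),
    ls.foldl pvStepA (pvDictOf g, pvLastName g)
      = (pvDictOf (ls.foldl pvStepB g), pvLastName (ls.foldl pvStepB g)) := by
  induction ls with
  | nil => intro g; rfl
  | cons line ls ih =>
    intro g
    rw [List.foldl_cons, List.foldl_cons, pvStep_eq]
    exact ih _

-- ===== VERDICT (by name: the statement is the Claim_ definition above) =====
theorem parse_dict_in_dict_section_spec : Claim_equal_parse_dict_in_dict_section := by
  intro cleared_lines _
  unfold Spec_parse_dict_in_dict_section parse_dict_in_dict_section parse_dict_in_dict_section_alt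
  have h := pvMain cleared_lines []
  have h0 : pvDictOf [] = PySem.Dict.empty := rfl
  have h1 : pvLastName [] = none := rfl
  rw [h0, h1] at h
  rw [h]
  rfl
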